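-- pv_equiv track=rewrite | github.com/Sujitapatel11/aiec | backend/api/chat_service.py | _make_recommendation
-- ===== SOURCE A (Python) =====
-- def _make_recommendation(user_msgs: list) -> dict:
--     """Simple rule-based recommendation from collected answers."""
--     budget_msg = user_msgs[4] if len(user_msgs) > 4 else ""
--     course_msg = user_msgs[3] if len(user_msgs) > 3 else ""
--
--     # Budget detection
--     high_budget = any(x in budget_msg for x in ['50', '60', '70', '80', '100'])
--     low_budget  = any(x in budget_msg for x in ['5', '8', '10', '12', '15'])
--
--     # Course detection
--     tech    = any(x in course_msg for x in ['computer', 'software', 'data', 'it', 'tech', 'engineering'])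
--     business = any(x in course_msg for x in ['business', 'mba', 'finance', 'management', 'marketing'])
--     health  = any(x in course_msg for x in ['nursing', 'health', 'medical', 'pharmacy'])
--
--     if high_budget:
--         country = "USA"
--         unis = "MIT, Stanford, Carnegie Mellon"
--     elif low_budget:
--         country = "Germany"
--         unis = "TU Munich, RWTH Aachen, University of Stuttgart"
--     else:
--         country = "Canada"
--         unis = "University of Toronto, UBC, McMaster University"
--
--     if tech:
--         course = "MS Computer Science / Data Science"
--     elif business:
--         course = "MBA / MSc Management"
--     elif health:
--         course = "MSc Nursing / Health Sciences"
--     else: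
--         course = "MSc in your chosen field"
--
--     return {
--         "country": country,
--         "course": course,
--         "universities": unis,
--         "reason": f"{country} offers excellent programs in {course} with strong career outcomes and post-study work options. Top universities include {unis}."
--     }
-- ===== SOURCE B (Python) =====
-- # Priority-min aggregation over a flat keyword->priority map, instead of
-- # boolean flags and if/elif chains: every keyword carries the index of its
-- # category; the chosen category is the minimum index among matched keywords
-- # (default = the fallback index), which equals A's chain because the chain
-- # tries categories in increasing index order.
--
-- _BUDGET_KEYWORDS = [
--     (kw, cat)
--     for cat, kws in enumerate([['50', '60', '70', '80', '100'],
--                                ['5', '8', '10', '12', '15']])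
--     for kw in kws
-- ]
-- _BUDGET_TABLE = [
--     ("USA", "MIT, Stanford, Carnegie Mellon"),
--     ("Germany", "TU Munich, RWTH Aachen, University of Stuttgart"),
--     ("Canada", "University of Toronto, UBC, McMaster University"),
-- ]
--
-- _COURSE_KEYWORDS = [
--     (kw, cat)
--     for cat, kws in enumerate([['computer', 'software', 'data', 'it', 'tech', 'engineering'],
--                                ['business', 'mba', 'finance', 'management', 'marketing'],
--                                ['nursing', 'health', 'medical', 'pharmacy']])
--     for kw in kws
-- ]
-- _COURSE_TABLE = [
--     "MS Computer Science / Data Science",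
--     "MBA / MSc Management",
--     "MSc Nursing / Health Sciences",
--     "MSc in your chosen field",
-- ]
--
--
-- def _category(msg, keywords, default):
--     """Smallest category index among keywords occurring in msg."""
--     return min((cat for kw, cat in keywords if kw in msg), default=default)
--
--
-- def _make_recommendation(user_msgs: list) -> dict:
--     budget_msg = user_msgs[4] if len(user_msgs) > 4 else ""
--     course_msg = user_msgs[3] if len(user_msgs) > 3 else ""
--
--     country, unis = _BUDGET_TABLE[_category(budget_msg, _BUDGET_KEYWORDS, 2)]
--     course = _COURSE_TABLE[_category(course_msg, _COURSE_KEYWORDS, 3)]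
--
--     return {
--         "country": country,
--         "course": course,
--         "universities": unis,
--         "reason": f"{country} offers excellent programs in {course} with strong career outcomes and post-study work options. Top universities include {unis}.",
--     }
-- ===== Notes on version B (the rewrite author's own statement) =====
-- stated objective: alternative
-- what changed: Replaced A's five per-category boolean flags and two if/elif chains by a flat keyword-to-priority map whose matches are aggregated with a running minimum (min with a fallback default), the resulting category index then selecting the country/universities and course from value tables.
import Mathlib
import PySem

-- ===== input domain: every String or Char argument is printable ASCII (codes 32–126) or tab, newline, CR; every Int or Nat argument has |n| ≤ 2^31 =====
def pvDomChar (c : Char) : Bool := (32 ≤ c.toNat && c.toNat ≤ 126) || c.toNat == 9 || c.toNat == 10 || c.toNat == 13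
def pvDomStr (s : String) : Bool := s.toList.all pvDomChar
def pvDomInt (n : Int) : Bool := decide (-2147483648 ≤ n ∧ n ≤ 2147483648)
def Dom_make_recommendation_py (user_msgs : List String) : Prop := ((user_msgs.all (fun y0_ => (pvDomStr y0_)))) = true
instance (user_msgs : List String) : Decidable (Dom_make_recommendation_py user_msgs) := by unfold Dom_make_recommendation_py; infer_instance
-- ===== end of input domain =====

-- B replaces A's boolean flags and if/elif chains by a flat keyword→priority map
-- aggregated with a running minimum, indexing value tables (objective: alternative; same cost).

-- ===== PORT A =====
def make_recommendation_py (user_msgs : List String) : List (String × String) :=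
  let budget_msg := if user_msgs.length > 4 then (PySem.List.pyGet? user_msgs 4).getD "" else ""
  let course_msg := if user_msgs.length > 3 then (PySem.List.pyGet? user_msgs 3).getD "" else ""
  let high_budget := ["50", "60", "70", "80", "100"].any (fun x => PySem.Str.isIn x budget_msg)
  let low_budget := ["5", "8", "10", "12", "15"].any (fun x => PySem.Str.isIn x budget_msg)
  let tech := ["computer", "software", "data", "it", "tech", "engineering"].any (fun x => PySem.Str.isIn x course_msg)
  let business := ["business", "mba", "finance", "management", "marketing"].any (fun x => PySem.Str.isIn x course_msg)
  let health := ["nursing", "health", "medical", "pharmacy"].any (fun x => PySem.Str.isIn x course_msg)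
  let cu : String × String :=
    if high_budget then ("USA", "MIT, Stanford, Carnegie Mellon")
    else if low_budget then ("Germany", "TU Munich, RWTH Aachen, University of Stuttgart")
    else ("Canada", "University of Toronto, UBC, McMaster University")
  let country := cu.1
  let unis := cu.2
  let course :=
    if tech then "MS Computer Science / Data Science"
    else if business then "MBA / MSc Management"
    else if health then "MSc Nursing / Health Sciences"
    else "MSc in your chosen field"
  [("country", country), ("course", course), ("universities", unis),
   ("reason", country ++ " offers excellent programs in " ++ course ++ " with strong career outcomes and post-study work options. Top universities include " ++ unis ++ ".")]

-- ===== PORT B =====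
-- flat keyword→category-index maps, built exactly as Source B's enumerate comprehensions
def pvBudgetKeywords : List (String × Int) :=
  (PySem.List.enumerate [["50", "60", "70", "80", "100"], ["5", "8", "10", "12", "15"]]).flatMap
    (fun p => p.2.map (fun kw => (kw, p.1)))
def pvBudgetTable : List (String × String) :=
  [("USA", "MIT, Stanford, Carnegie Mellon"),
   ("Germany", "TU Munich, RWTH Aachen, University of Stuttgart"),
   ("Canada", "University of Toronto, UBC, McMaster University")]
def pvCourseKeywords : List (String × Int) :=
  (PySem.List.enumerate [["computer", "software", "data", "it", "tech", "engineering"],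
                         ["business", "mba", "finance", "management", "marketing"],
                         ["nursing", "health", "medical", "pharmacy"]]).flatMap
    (fun p => p.2.map (fun kw => (kw, p.1)))
def pvCourseTable : List String :=
  ["MS Computer Science / Data Science", "MBA / MSc Management",
   "MSc Nursing / Health Sciences", "MSc in your chosen field"]

-- min((cat for kw, cat in keywords if kw in msg), default=default) as the running-min fold
def pvCategory (msg : String) (keywords : List (String × Int)) (dflt : Int) : Int :=
  keywords.foldl (fun m p => if PySem.Str.isIn p.1 msg then min m p.2 else m) dflt

def make_recommendation_py_alt (user_msgs : List String) : List (String × String) :=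
  let budget_msg := if user_msgs.length > 4 then (PySem.List.pyGet? user_msgs 4).getD "" else ""
  let course_msg := if user_msgs.length > 3 then (PySem.List.pyGet? user_msgs 3).getD "" else ""
  -- table indices are always in range (the category is ≤ the default index), so getD's default is never used
  let cu := (PySem.List.pyGet? pvBudgetTable (pvCategory budget_msg pvBudgetKeywords 2)).getD ("", "")
  let country := cu.1
  let unis := cu.2
  let course := (PySem.List.pyGet? pvCourseTable (pvCategory course_msg pvCourseKeywords 3)).getD ""
  [("country", country), ("course", course), ("universities", unis),
   ("reason", country ++ " offers excellent programs in " ++ course ++ " with strong career outcomes and post-study work options. Top universities include " ++ unis ++ ".")]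

-- ===== PRECONDITION & SPEC =====
def Spec_make_recommendation_py (user_msgs : List String) (out : List (String × String)) : Prop := out = make_recommendation_py_alt user_msgs
instance (user_msgs : List String) (out : List (String × String)) : Decidable (Spec_make_recommendation_py user_msgs out) := by unfold Spec_make_recommendation_py; infer_instance

-- ===== CLAIM (what is proved, stated in full; the proofs are below) =====
def Claim_equal_make_recommendation_py : Prop := ∀ (user_msgs : List String), Dom_make_recommendation_py user_msgs → Spec_make_recommendation_py user_msgs (make_recommendation_py user_msgs)

-- ===== LEMMAS AND PROOFS =====

-- folding the running min over a block of keywords that all carry the same category index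
theorem pv_foldl_min_const (msg : String) (kws : List String) (c : Int) (acc : Int) :
    pvCategory msg (kws.map (fun k => (k, c))) acc
      = if kws.any (fun k => PySem.Str.isIn k msg) then min acc c else acc := by
  induction kws generalizing acc with
  | nil => simp [pvCategory]
  | cons k t ih =>
    rw [List.map_cons, List.any_cons]
    show pvCategory msg (t.map (fun k => (k, c))) (if PySem.Str.isIn k msg then min acc c else acc) = _
    rw [ih]
    by_cases h : PySem.Str.isIn k msg <;>
      by_cases h2 : (t.any fun x => PySem.Str.isIn x msg) <;>
        simp only [h, h2, Bool.true_or, Bool.false_or, Bool.or_self, if_true, if_false,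
          Bool.false_eq_true, eq_self_iff_true] <;>
          omega

theorem pv_budget_cat (bm : String) :
    pvCategory bm pvBudgetKeywords 2
      = (if ["50", "60", "70", "80", "100"].any (fun x => PySem.Str.isIn x bm) then 0
         else if ["5", "8", "10", "12", "15"].any (fun x => PySem.Str.isIn x bm) then 1 else 2) := by
  have h : pvBudgetKeywords
      = (["50", "60", "70", "80", "100"].map (fun k => (k, (0 : Int))))
        ++ (["5", "8", "10", "12", "15"].map (fun k => (k, (1 : Int)))) := by decide
  rw [h]
  show pvCategory bm _ 2 = _
  rw [pvCategory, List.foldl_append, ← pvCategory, ← pvCategory, pv_foldl_min_const, pv_foldl_min_const]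
  split_ifs <;> norm_num

theorem pv_course_cat (cm : String) :
    pvCategory cm pvCourseKeywords 3
      = (if ["computer", "software", "data", "it", "tech", "engineering"].any (fun x => PySem.Str.isIn x cm) then 0
         else if ["business", "mba", "finance", "management", "marketing"].any (fun x => PySem.Str.isIn x cm) then 1
         else if ["nursing", "health", "medical", "pharmacy"].any (fun x => PySem.Str.isIn x cm) then 2 else 3) := by
  have h : pvCourseKeywords
      = ((["computer", "software", "data", "it", "tech", "engineering"].map (fun k => (k, (0 : Int))))
        ++ (["business", "mba", "finance", "management", "marketing"].map (fun k => (k, (1 : Int)))))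
        ++ (["nursing", "health", "medical", "pharmacy"].map (fun k => (k, (2 : Int)))) := by decide
  rw [h]
  rw [pvCategory, List.foldl_append, List.foldl_append, ← pvCategory, ← pvCategory, ← pvCategory,
    pv_foldl_min_const, pv_foldl_min_const, pv_foldl_min_const]
  split_ifs <;> norm_num

-- the shared dict/reason builder and the two zeta-reduced bodies (proof-only helpers)
def pvMk (cu : String × String) (course : String) : List (String × String) :=
  [("country", cu.1), ("course", course), ("universities", cu.2),
   ("reason", cu.1 ++ " offers excellent programs in " ++ course ++ " with strong career outcomes and post-study work options. Top universities include " ++ cu.2 ++ ".")]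

theorem pv_core (bm cm : String) :
    pvMk (if ["50", "60", "70", "80", "100"].any (fun x => PySem.Str.isIn x bm) then ("USA", "MIT, Stanford, Carnegie Mellon")
          else if ["5", "8", "10", "12", "15"].any (fun x => PySem.Str.isIn x bm) then ("Germany", "TU Munich, RWTH Aachen, University of Stuttgart")
          else ("Canada", "University of Toronto, UBC, McMaster University"))
         (if ["computer", "software", "data", "it", "tech", "engineering"].any (fun x => PySem.Str.isIn x cm) then "MS Computer Science / Data Science"
          else if ["business", "mba", "finance", "management", "marketing"].any (fun x => PySem.Str.isIn x cm) then "MBA / MSc Management"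
          else if ["nursing", "health", "medical", "pharmacy"].any (fun x => PySem.Str.isIn x cm) then "MSc Nursing / Health Sciences"
          else "MSc in your chosen field")
      = pvMk ((PySem.List.pyGet? pvBudgetTable (pvCategory bm pvBudgetKeywords 2)).getD ("", ""))
             ((PySem.List.pyGet? pvCourseTable (pvCategory cm pvCourseKeywords 3)).getD "") := by
  rw [pv_budget_cat, pv_course_cat]
  by_cases h1 : ["50", "60", "70", "80", "100"].any (fun x => PySem.Str.isIn x bm) <;>
  by_cases h2 : ["5", "8", "10", "12", "15"].any (fun x => PySem.Str.isIn x bm) <;>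
  by_cases h3 : ["computer", "software", "data", "it", "tech", "engineering"].any (fun x => PySem.Str.isIn x cm) <;>
  by_cases h4 : ["business", "mba", "finance", "management", "marketing"].any (fun x => PySem.Str.isIn x cm) <;>
  by_cases h5 : ["nursing", "health", "medical", "pharmacy"].any (fun x => PySem.Str.isIn x cm) <;>
  simp only [h1, h2, h3, h4, h5, if_true, if_false, eq_self_iff_true] <;> rfl

-- ===== VERDICT (by name: the statement is the Claim_ definition above) =====
theorem make_recommendation_py_spec : Claim_equal_make_recommendation_py := by
  intro user_msgs _
  unfold Spec_make_recommendation_py make_recommendation_py make_recommendation_py_alt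
  exact pv_core _ _
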